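-- pv_equiv track=rewrite | github.com/J-Cos/tangled-nature | spatial_viz.py | pick_time_points
-- ===== SOURCE A (Python) =====
-- def pick_time_points(snapshots):
--     """Pick snapshots at gen 0, ~1/3, ~2/3, and final generation."""
--     max_gen = max(s["gen"] for s in snapshots)
--     targets = [0, max_gen // 3, 2 * max_gen // 3, max_gen]
--     result = []
--     for t in targets:
--         best = min(snapshots, key=lambda s: abs(s["gen"] - t))
--         result.append(best)
--     return result
-- ===== SOURCE B (Python) =====
-- def pick_time_points(snapshots):
--     """Pick snapshots at gen 0, ~1/3, ~2/3, and final generation (single pass)."""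
--     max_gen = max(s["gen"] for s in snapshots)
--     t0, t1, t2, t3 = 0, max_gen // 3, 2 * max_gen // 3, max_gen
--     b0 = b1 = b2 = b3 = None
--     for s in snapshots:
--         g = s["gen"]
--         if b0 is None or abs(g - t0) < b0[0]:
--             b0 = (abs(g - t0), s)
--         if b1 is None or abs(g - t1) < b1[0]:
--             b1 = (abs(g - t1), s)
--         if b2 is None or abs(g - t2) < b2[0]:
--             b2 = (abs(g - t2), s)
--         if b3 is None or abs(g - t3) < b3[0]:
--             b3 = (abs(g - t3), s)
--     return [b0[1], b1[1], b2[1], b3[1]]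
-- ===== Notes on version B (the rewrite author's own statement) =====
-- stated objective: alternative
-- what changed: A rescans the whole snapshot list with min() once per target; B makes a single fused pass maintaining four (best-distance, best-snapshot) records with strict-less updates (preserving min's first-occurrence tie-break).
import Mathlib
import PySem

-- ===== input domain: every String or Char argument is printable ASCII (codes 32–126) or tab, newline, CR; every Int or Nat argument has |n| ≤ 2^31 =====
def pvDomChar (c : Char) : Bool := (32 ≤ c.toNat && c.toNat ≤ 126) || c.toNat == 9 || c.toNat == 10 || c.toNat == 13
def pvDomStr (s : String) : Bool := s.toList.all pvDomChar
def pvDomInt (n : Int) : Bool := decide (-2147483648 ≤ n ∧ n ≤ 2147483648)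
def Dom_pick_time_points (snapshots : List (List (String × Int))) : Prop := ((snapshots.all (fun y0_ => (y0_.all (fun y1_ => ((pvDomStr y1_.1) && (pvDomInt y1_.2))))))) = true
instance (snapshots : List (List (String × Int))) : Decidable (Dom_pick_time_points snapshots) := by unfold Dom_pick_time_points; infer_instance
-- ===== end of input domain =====

-- B fuses A's four min-scans into one pass keeping four (best-distance, best-snapshot) records (objective: alternative, one fused traversal instead of four scans).

-- ===== PORT A =====
-- s["gen"] (only evaluated under Pre_, where the key is present)
def pvGen (s : List (String × Int)) : Int := (PySem.Dict.mk s).getD "gen" 0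

def pick_time_points (snapshots : List (List (String × Int))) : List (List (String × Int)) :=
  let max_gen := (PySem.List.max? (snapshots.map (fun s => pvGen s)) (fun x => x)).getD 0
  let targets : List Int := [0, PySem.Int.floordiv max_gen 3, PySem.Int.floordiv (2 * max_gen) 3, max_gen]
  targets.foldl
    (fun result t => result ++ [(PySem.List.min? snapshots (fun s => |pvGen s - t|)).getD []])
    []

-- ===== PORT B =====
-- one strict-less update of a (best-distance, best-snapshot) record
def pvUpd (t : Int) (r : Option (Int × List (String × Int))) (s : List (String × Int)) :
    Option (Int × List (String × Int)) :=
  match r with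
  | none => some (|pvGen s - t|, s)
  | some (bd, bs) => if |pvGen s - t| < bd then some (|pvGen s - t|, s) else some (bd, bs)

def pick_time_points_alt (snapshots : List (List (String × Int))) : List (List (String × Int)) :=
  let max_gen := (PySem.List.max? (snapshots.map (fun s => pvGen s)) (fun x => x)).getD 0
  let t1 := PySem.Int.floordiv max_gen 3
  let t2 := PySem.Int.floordiv (2 * max_gen) 3
  let st := snapshots.foldl
    (fun st s => (pvUpd 0 st.1 s, pvUpd t1 st.2.1 s, pvUpd t2 st.2.2.1 s, pvUpd max_gen st.2.2.2 s))
    (none, none, none, none)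
  [(st.1.getD (0, [])).2, (st.2.1.getD (0, [])).2, (st.2.2.1.getD (0, [])).2, (st.2.2.2.getD (0, [])).2]

-- ===== PRECONDITION & SPEC =====
-- Pre_ excludes exactly the inputs where Python A raises: the empty list (ValueError from max)
-- and snapshots lacking a "gen" key (KeyError).
def Pre_pick_time_points (snapshots : List (List (String × Int))) : Prop :=
  snapshots ≠ [] ∧ ∀ s ∈ snapshots, (s.any (fun p => p.1 == "gen")) = true
instance (snapshots : List (List (String × Int))) : Decidable (Pre_pick_time_points snapshots) := by
  unfold Pre_pick_time_points; infer_instance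

def pvWitness_pick_time_points : (List (List (String × Int))) := [[("gen", 0)]]

def Spec_pick_time_points (snapshots : List (List (String × Int))) (out : List (List (String × Int))) : Prop := out = pick_time_points_alt snapshots
instance (snapshots : List (List (String × Int))) (out : List (List (String × Int))) : Decidable (Spec_pick_time_points snapshots out) := by unfold Spec_pick_time_points; infer_instance

-- ===== CLAIM (what is proved, stated in full; the proofs are below) =====
def Claim_equal_pick_time_points : Prop := ∀ (snapshots : List (List (String × Int))), Dom_pick_time_points snapshots → Pre_pick_time_points snapshots → Spec_pick_time_points snapshots (pick_time_points snapshots)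

-- ===== LEMMAS AND PROOFS =====

-- a fold with a 4-tuple state is four independent folds (4-ary shape of PySem.List.foldl_prod_mk)
theorem foldl_quad {β σ₁ σ₂ σ₃ σ₄ : Type} (f1 : σ₁ → β → σ₁) (f2 : σ₂ → β → σ₂)
    (f3 : σ₃ → β → σ₃) (f4 : σ₄ → β → σ₄) (l : List β) (a : σ₁) (b : σ₂) (c : σ₃) (d : σ₄) :
    l.foldl (fun st e => (f1 st.1 e, f2 st.2.1 e, f3 st.2.2.1 e, f4 st.2.2.2 e)) (a, b, c, d) =
      (l.foldl f1 a, l.foldl f2 b, l.foldl f3 c, l.foldl f4 d) := by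
  induction l generalizing a b c d with
  | nil => rfl
  | cons x l ih => simpa using ih ..

-- B's fused record-fold computes min?'s fold, packaged with its key value.
theorem foldl_pvUpd_eq (t : Int) (xs : List (List (String × Int)))
    (r : Option (List (String × Int))) :
    xs.foldl (pvUpd t) (r.map (fun m => (|pvGen m - t|, m))) =
      (xs.foldl
        (fun acc x =>
          match acc with
          | none => some x
          | some m => if |pvGen x - t| < |pvGen m - t| then some x else some m)
        r).map (fun m => (|pvGen m - t|, m)) := by
  induction xs generalizing r with
  | nil => rfl
  | cons x xs ih =>
    cases r with
    | none => simpa [pvUpd] using ih (some x)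
    | some m =>
      by_cases h : |pvGen x - t| < |pvGen m - t|
      · simpa [pvUpd, h] using ih (some x)
      · simpa [pvUpd, h] using ih (some m)

-- the per-target component of B equals A's min-scan result
theorem component_eq (t : Int) (xs : List (List (String × Int))) :
    ((xs.foldl (pvUpd t) none).getD (0, [])).2 =
      (PySem.List.min? xs (fun s => |pvGen s - t|)).getD [] := by
  have h := foldl_pvUpd_eq t xs none
  simp only [Option.map_none] at h
  rw [h]
  have hmin : PySem.List.min? xs (fun s => |pvGen s - t|) =
      xs.foldl
        (fun acc x =>
          match acc with
          | none => some x
          | some m => if |pvGen x - t| < |pvGen m - t| then some x else some m)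
        none := by
    unfold PySem.List.min?
    congr 1
    funext acc x
    cases acc <;> rfl
  rw [hmin]
  cases xs.foldl
      (fun acc x =>
        match acc with
        | none => some x
        | some m => if |pvGen x - t| < |pvGen m - t| then some x else some m)
      none with
  | none => rfl
  | some m => rfl

-- ===== VERDICT (by name: the statement is the Claim_ definition above) =====
theorem pick_time_points_spec : Claim_equal_pick_time_points := by
  intro snapshots _ _
  unfold Spec_pick_time_points pick_time_points pick_time_points_alt
  dsimp only
  rw [foldl_quad]
  simp only [List.foldl, List.nil_append]
  rw [component_eq, component_eq, component_eq, component_eq]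
  simp
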